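-- pv_equiv track=rewrite | github.com/etherion-1337/LeetCode | medium/3356_zero_array_transformation_II/solution.py | can_form_zero_array
-- ===== SOURCE A (Python) =====
-- from typing import List
--
-- def can_form_zero_array(nums: List[int], queries: List[List[int]], k: int) -> bool:
--     prefix_sum = 0
--     diff_arr = [0] * (len(nums) + 1)
--
--     # process first k quries
--     for q_idx in range(k):
--         start, end, val = queries[q_idx]
--         # diff arr can be used reconstruct prefix sum
--         diff_arr[start] += val
--         diff_arr[end + 1] -= val
--
--     # check if zero arr is possible
--     for num_idx in range(len(nums)):
--         prefix_sum += diff_arr[num_idx]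
--         if prefix_sum < nums[num_idx]:
--             return False
--     return True
-- ===== SOURCE B (Python) =====
-- from typing import List
--
-- def can_form_zero_array(nums: List[int], queries: List[List[int]], k: int) -> bool:
--     cover = [0] * len(nums)
--     for q_idx in range(k):
--         start, end, val = queries[q_idx]
--         for j in range(start, end + 1):
--             cover[j] += val
--     return all(c >= n for c, n in zip(cover, nums))
-- ===== Notes on version B (the rewrite author's own statement) =====
-- stated objective: alternative
-- what changed: Replaces the difference-array + prefix-sum scheme with direct per-query range accumulation into a coverage array that is then compared pointwise against nums.
-- outside the precondition, e.g. on can_form_zero_array([0, 0], [[-1, 0, 1]], 1): A returns False, B returns True; on can_form_zero_array([-1, 0], [[2, 0, 1]], 1): A returns False, B returns True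
import Mathlib
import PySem

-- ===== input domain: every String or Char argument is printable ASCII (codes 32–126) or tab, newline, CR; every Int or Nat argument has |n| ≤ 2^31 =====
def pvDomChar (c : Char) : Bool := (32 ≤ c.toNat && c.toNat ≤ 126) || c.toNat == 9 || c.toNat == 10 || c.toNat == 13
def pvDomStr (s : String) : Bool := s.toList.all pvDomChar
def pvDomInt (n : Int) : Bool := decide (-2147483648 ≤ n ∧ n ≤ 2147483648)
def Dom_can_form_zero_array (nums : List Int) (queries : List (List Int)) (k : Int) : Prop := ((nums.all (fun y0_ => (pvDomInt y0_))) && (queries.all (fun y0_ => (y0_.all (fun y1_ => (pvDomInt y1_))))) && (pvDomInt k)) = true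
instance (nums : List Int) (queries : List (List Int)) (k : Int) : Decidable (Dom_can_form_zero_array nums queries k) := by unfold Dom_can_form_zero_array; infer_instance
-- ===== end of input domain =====

-- B replaces A's difference-array + prefix-sum scheme by direct per-query range accumulation
-- into a coverage array compared pointwise (objective: alternative algorithm, same results).

-- ===== PORT A =====
-- Python `xs[i] += v` (negative index wraps; where Python raises IndexError the list is
-- returned unchanged — those inputs are outside Pre_).
def pvPyIdx (len : Nat) (i : Int) : Int := if i < 0 then i + len else i

def pvAddAt (xs : List Int) (i v : Int) : List Int :=
  if 0 ≤ pvPyIdx xs.length i ∧ pvPyIdx xs.length i < xs.length then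
    xs.set (pvPyIdx xs.length i).toNat (xs.getD (pvPyIdx xs.length i).toNat 0 + v)
  else xs

-- one iteration of A's query loop: diff_arr[start] += val; diff_arr[end+1] -= val
-- (q's fields read with default 0; a query of length ≠ 3 raises in Python and is outside Pre_)
def pvAStep (d : List Int) (q : List Int) : List Int :=
  let start := PySem.List.pyGetD q 0 0
  let e := PySem.List.pyGetD q 1 0
  let val := PySem.List.pyGetD q 2 0
  pvAddAt (pvAddAt d start val) (e + 1) (-val)

-- A's second loop: walk nums with the running prefix_sum, early-return False
def pvCheckA : List Int → List Int → Int → Bool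
  | [], _, _ => true
  | n :: ns, ds, ps =>
    let ps' := ps + ds.headD 0
    if ps' < n then false else pvCheckA ns ds.tail ps'

def can_form_zero_array (nums : List Int) (queries : List (List Int)) (k : Int) : Bool :=
  let diff0 : List Int := List.replicate (nums.length + 1) 0
  let diff := (PySem.List.pyRange 0 k 1).foldl
    (fun d qi => pvAStep d (PySem.List.pyGetD queries qi [])) diff0
  pvCheckA nums diff 0

-- ===== PORT B =====
-- B's inner loop: for j in range(start, end+1): cover[j] += val
def pvRangeAdd (cover : List Int) (s e v : Int) : List Int :=
  (PySem.List.pyRange s (e + 1) 1).foldl (fun c j => pvAddAt c j v) cover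

def pvBStep (c : List Int) (q : List Int) : List Int :=
  pvRangeAdd c (PySem.List.pyGetD q 0 0) (PySem.List.pyGetD q 1 0) (PySem.List.pyGetD q 2 0)

def can_form_zero_array_alt (nums : List Int) (queries : List (List Int)) (k : Int) : Bool :=
  let cover0 : List Int := List.replicate nums.length 0
  let cover := (PySem.List.pyRange 0 k 1).foldl
    (fun c qi => pvBStep c (PySem.List.pyGetD queries qi [])) cover0
  (cover.zip nums).all (fun p => decide (p.2 ≤ p.1))

-- ===== PRECONDITION & SPEC =====
-- Pre_ excludes inputs where A raises (k > len(queries), a processed query not of length 3 or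
-- with end+1 past the diff array) and processed queries with a negative start or start > end+1,
-- where A's returned value comes from accidental negative-index wrap-around or reversed-range
-- cancellation in the diff array.
def Pre_can_form_zero_array (nums : List Int) (queries : List (List Int)) (k : Int) : Prop :=
  k ≤ queries.length ∧
  ∀ q ∈ queries.take k.toNat,
    q.length = 3 ∧ 0 ≤ q.getD 0 0 ∧ q.getD 0 0 ≤ q.getD 1 0 + 1 ∧ q.getD 1 0 + 1 ≤ nums.length
instance (nums : List Int) (queries : List (List Int)) (k : Int) : Decidable (Pre_can_form_zero_array nums queries k) := by unfold Pre_can_form_zero_array; infer_instance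

def pvWitness_can_form_zero_array : List Int × List (List Int) × Int := ([1, 0], [[0, 0, 1], [1, 1, 2]], 2)

def Spec_can_form_zero_array (nums : List Int) (queries : List (List Int)) (k : Int) (out : Bool) : Prop := out = can_form_zero_array_alt nums queries k
instance (nums : List Int) (queries : List (List Int)) (k : Int) (out : Bool) : Decidable (Spec_can_form_zero_array nums queries k out) := by unfold Spec_can_form_zero_array; infer_instance

-- ===== CLAIM (what is proved, stated in full; the proofs are below) =====
def Claim_equal_can_form_zero_array : Prop := ∀ (nums : List Int) (queries : List (List Int)) (k : Int), Dom_can_form_zero_array nums queries k → Pre_can_form_zero_array nums queries k → Spec_can_form_zero_array nums queries k (can_form_zero_array nums queries k)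

-- ===== LEMMAS AND PROOFS =====

theorem length_pvAddAt (xs : List Int) (i v : Int) : (pvAddAt xs i v).length = xs.length := by
  unfold pvAddAt; split <;> simp

theorem pvAddAt_in_range (xs : List Int) (i v : Int) (h0 : 0 ≤ i) (h1 : i < xs.length) :
    pvAddAt xs i v = xs.set i.toNat (xs.getD i.toNat 0 + v) := by
  have hj : pvPyIdx xs.length i = i := by unfold pvPyIdx; rw [if_neg (by omega)]
  unfold pvAddAt
  rw [hj, if_pos ⟨h0, h1⟩]

theorem getD_pvAddAt (xs : List Int) (i v : Int) (m : Nat)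
    (h0 : 0 ≤ i) (h1 : i < xs.length) :
    (pvAddAt xs i v).getD m 0 = xs.getD m 0 + if (m : Int) = i then v else 0 := by
  rw [pvAddAt_in_range xs i v h0 h1]
  by_cases hm : (m : Int) = i
  · have hmi : m = i.toNat := by omega
    subst hmi
    have hlt : i.toNat < xs.length := by omega
    simp [List.getD_eq_getElem?_getD, hlt, hm]
  · have hne : i.toNat ≠ m := by omega
    simp [List.getD_eq_getElem?_getD, List.getElem?_set_ne hne, hm]

theorem takeSum_pvAddAt (xs : List Int) (i v : Int) (m : Nat)
    (h0 : 0 ≤ i) (h1 : i < xs.length) :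
    ((pvAddAt xs i v).take m).sum = (xs.take m).sum + if i < (m : Int) then v else 0 := by
  rw [pvAddAt_in_range xs i v h0 h1, List.take_set]
  by_cases hm : i < (m : Int)
  · have hlt : i.toNat < (xs.take m).length := by simp; omega
    rw [List.sum_set, if_pos hlt, if_pos hm]
    have hsplit : (xs.take m).sum = ((xs.take m).take i.toNat).sum + ((xs.take m).drop i.toNat).sum :=
      (List.sum_take_add_sum_drop _ _).symm
    have hdrop : (xs.take m).drop i.toNat = (xs.take m)[i.toNat] :: (xs.take m).drop (i.toNat + 1) :=
      List.drop_eq_getElem_cons hlt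
    have hget : (xs.take m)[i.toNat] = xs.getD i.toNat 0 := by
      rw [List.getElem_take]
      simp [List.getD_eq_getElem?_getD, List.getElem?_eq_getElem (by omega : i.toNat < xs.length)]
    rw [hsplit, hdrop, hget]
    simp only [List.sum_cons]
    ring
  · have hge : (xs.take m).length ≤ i.toNat := by simp; omega
    rw [List.set_eq_of_length_le hge, if_neg hm, add_zero]

-- invariant relating A's diff array and B's cover array
def pvInv (L : Nat) (diff cover : List Int) : Prop :=
  diff.length = L + 1 ∧ cover.length = L ∧
  ∀ i : Nat, i < L → (diff.take (i + 1)).sum = cover.getD i 0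

theorem length_foldl_pvAddAt (v : Int) (l : List Int) (cover : List Int) :
    (l.foldl (fun c j => pvAddAt c j v) cover).length = cover.length := by
  induction l generalizing cover with
  | nil => rfl
  | cons x xs ih => simp [List.foldl, ih, length_pvAddAt]

theorem getD_rangeAdd (v : Int) : ∀ (n : Nat) (a b : Int) (cover : List Int), 0 ≤ a →
    b ≤ cover.length → (b - a).toNat = n → ∀ m : Nat, m < cover.length →
    ((PySem.List.pyRange a b 1).foldl (fun c j => pvAddAt c j v) cover).getD m 0
      = cover.getD m 0 + if a ≤ (m : Int) ∧ (m : Int) < b then v else 0 := by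
  intro n
  induction n with
  | zero =>
    intro a b cover ha hb hn m hm
    rw [PySem.List.pyRange_one_eq_nil (by omega)]
    rw [if_neg (by omega)]
    simp
  | succ n ih =>
    intro a b cover ha hb hn m hm
    rw [PySem.List.pyRange_one_cons (by omega)]
    simp only [List.foldl]
    have hlen : (pvAddAt cover a v).length = cover.length := length_pvAddAt _ _ _
    rw [ih (a + 1) b (pvAddAt cover a v) (by omega) (by omega) (by omega) m (by omega)]
    rw [getD_pvAddAt cover a v m ha (by omega)]
    split_ifs <;> omega

theorem foldl_pyRange_getD_take {α β : Type} (f : α → β → α) (d : β) :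
    ∀ (n : Nat) (a : Int) (l : List β) (init : α), 0 ≤ a → a.toNat + n ≤ l.length →
    (PySem.List.pyRange a (a + n) 1).foldl (fun acc j => f acc (PySem.List.pyGetD l j d)) init
      = ((l.drop a.toNat).take n).foldl f init := by
  intro n
  induction n with
  | zero =>
    intro a l init ha hl
    rw [(by omega : a + (0:Nat) = a), PySem.List.pyRange_one_eq_nil (by omega)]
    simp
  | succ n ih =>
    intro a l init ha hl
    rw [PySem.List.pyRange_one_cons (by push_cast; omega)]
    simp only [List.foldl]
    have ha' : a.toNat < l.length := by omega
    rw [PySem.List.pyGetD_eq_getElem l d ha (by omega)]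
    rw [List.drop_eq_getElem_cons ha']
    simp only [List.take_succ_cons, List.foldl]
    have heq : a + ((n + 1 : Nat) : Int) = (a + 1) + (n : Nat) := by push_cast; ring
    rw [heq, ih (a + 1) l (f init l[a.toNat]) (by omega) (by omega)]
    rw [(by omega : (a + 1).toNat = a.toNat + 1)]

theorem pvIfArith (s e v c : Int) (i : Nat) (hse : s ≤ e + 1) :
    (c + if s < (↑(i + 1) : Int) then v else 0) + (if e + 1 < (↑(i + 1) : Int) then -v else 0)
      = c + if s ≤ (i : Int) ∧ (i : Int) < e + 1 then v else 0 := by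
  split_ifs <;> omega

-- one query preserves the invariant
theorem pvStep_inv (L : Nat) (diff cover q : List Int)
    (hq : q.length = 3 ∧ 0 ≤ q.getD 0 0 ∧ q.getD 0 0 ≤ q.getD 1 0 + 1 ∧ q.getD 1 0 + 1 ≤ L)
    (h : pvInv L diff cover) : pvInv L (pvAStep diff q) (pvBStep cover q) := by
  obtain ⟨hd, hc, hsum⟩ := h
  obtain ⟨hq3, hs0, hse, heL⟩ := hq
  set s := q.getD 0 0 with hs
  set e := q.getD 1 0 with he
  have hgs : PySem.List.pyGetD q 0 0 = s := PySem.List.pyGetD_ofNat' q 0 0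
  have hge : PySem.List.pyGetD q 1 0 = e := PySem.List.pyGetD_ofNat' q 1 0
  refine ⟨?_, ?_, ?_⟩
  · unfold pvAStep; rw [length_pvAddAt, length_pvAddAt, hd]
  · unfold pvBStep pvRangeAdd; rw [length_foldl_pvAddAt, hc]
  · intro i hi
    unfold pvAStep
    unfold pvBStep pvRangeAdd
    rw [hgs, hge]
    have hlen1 : (pvAddAt diff s (PySem.List.pyGetD q 2 0)).length = diff.length := length_pvAddAt _ _ _
    rw [takeSum_pvAddAt _ _ _ _ (by omega) (by rw [hlen1]; omega)]
    rw [takeSum_pvAddAt _ _ _ _ (by omega) (by omega)]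
    rw [getD_rangeAdd _ ((e + 1 - s).toNat) s (e + 1) cover (by omega) (by omega) rfl i (by omega)]
    rw [← hsum i hi]
    exact pvIfArith s e (PySem.List.pyGetD q 2 0) _ i hse

theorem pvFold_inv (L : Nat) : ∀ (qs : List (List Int)) (diff cover : List Int),
    (∀ q ∈ qs, q.length = 3 ∧ 0 ≤ q.getD 0 0 ∧ q.getD 0 0 ≤ q.getD 1 0 + 1 ∧ q.getD 1 0 + 1 ≤ L) →
    pvInv L diff cover → pvInv L (qs.foldl pvAStep diff) (qs.foldl pvBStep cover) := by
  intro qs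
  induction qs with
  | nil => intro diff cover _ h; exact h
  | cons q qs ih =>
    intro diff cover hq h
    simp only [List.foldl]
    exact ih _ _ (fun q' hq' => hq q' (by simp [hq'])) (pvStep_inv L diff cover q (hq q (by simp)) h)

theorem takeSum_tail (ds : List Int) (i : Nat) :
    (ds.take (i + 2)).sum = ds.headD 0 + (ds.tail.take (i + 1)).sum := by
  cases ds <;> simp

theorem pvCheckA_eq : ∀ (ns cs ds : List Int) (ps : Int),
    cs.length = ns.length →
    (∀ i : Nat, i < ns.length → cs.getD i 0 = ps + (ds.take (i + 1)).sum) →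
    pvCheckA ns ds ps = (cs.zip ns).all (fun p => decide (p.2 ≤ p.1)) := by
  intro ns
  induction ns with
  | nil =>
    intro cs ds ps hlen _
    rw [List.length_nil, List.length_eq_zero_iff] at hlen
    subst hlen; rfl
  | cons n ns ih =>
    intro cs ds ps hlen hsum
    cases cs with
    | nil => simp at hlen
    | cons c cs =>
      have hc : c = ps + ds.headD 0 := by
        have h0 := hsum 0 (by simp)
        cases ds <;> simpa using h0
      simp only [pvCheckA, List.zip_cons_cons, List.all_cons]
      by_cases hlt : ps + ds.headD 0 < n
      · rw [if_pos hlt]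
        have : ¬ (n ≤ c) := by omega
        simp [this]
      · rw [if_neg hlt]
        have hnc : n ≤ c := by omega
        simp only [hnc, decide_true, Bool.true_and]
        apply ih cs ds.tail (ps + ds.headD 0) (by simpa using hlen)
        intro i hi
        have := hsum (i + 1) (by simpa using Nat.succ_lt_succ hi)
        rw [takeSum_tail] at this
        simpa [add_assoc] using this

-- ===== VERDICT (by name: the statement is the Claim_ definition above) =====
theorem can_form_zero_array_spec : Claim_equal_can_form_zero_array := by
  intro nums queries k _ hpre
  obtain ⟨hk1, hq⟩ := hpre
  unfold Spec_can_form_zero_array can_form_zero_array can_form_zero_array_alt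
  have hA : (PySem.List.pyRange 0 k 1).foldl
      (fun d qi => pvAStep d (PySem.List.pyGetD queries qi [])) (List.replicate (nums.length + 1) 0)
      = (queries.take k.toNat).foldl pvAStep (List.replicate (nums.length + 1) 0) := by
    by_cases hk : 0 ≤ k
    · have h := foldl_pyRange_getD_take pvAStep ([] : List Int) k.toNat 0 queries
        (List.replicate (nums.length + 1) 0) (by omega)
        (by simp only [Int.toNat_zero, Nat.zero_add]; omega)
      rw [(by omega : (0 : Int) + (k.toNat : Nat) = k)] at h
      simpa using h
    · rw [PySem.List.pyRange_one_eq_nil (by omega), (by omega : k.toNat = 0)]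
      simp
  have hB : (PySem.List.pyRange 0 k 1).foldl
      (fun c qi => pvBStep c (PySem.List.pyGetD queries qi [])) (List.replicate nums.length 0)
      = (queries.take k.toNat).foldl pvBStep (List.replicate nums.length 0) := by
    by_cases hk : 0 ≤ k
    · have h := foldl_pyRange_getD_take pvBStep ([] : List Int) k.toNat 0 queries
        (List.replicate nums.length 0) (by omega)
        (by simp only [Int.toNat_zero, Nat.zero_add]; omega)
      rw [(by omega : (0 : Int) + (k.toNat : Nat) = k)] at h
      simpa using h
    · rw [PySem.List.pyRange_one_eq_nil (by omega), (by omega : k.toNat = 0)]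
      simp
  simp only [hA, hB]
  have hinv0 : pvInv nums.length (List.replicate (nums.length + 1) 0) (List.replicate nums.length 0) := by
    refine ⟨by simp, by simp, ?_⟩
    intro i hi
    rw [List.take_replicate]
    simp [List.getD_eq_getElem?_getD, hi]
  have hinv := pvFold_inv nums.length (queries.take k.toNat) _ _
    (fun q hq' => hq q hq') hinv0
  obtain ⟨hd, hc, hsum⟩ := hinv
  exact pvCheckA_eq nums _ _ 0 (by rw [hc]) (fun i hi => by rw [← hsum i hi]; ring)
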